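-- pv_equiv track=rewrite | github.com/gyarab/enduroBuddy | backend/dashboard/services/planned_interval_formatter.py | _split_top_level_plus
-- ===== SOURCE A (Python) =====
-- def _split_top_level_plus(text: str) -> list[str]:
--     parts: list[str] = []
--     current: list[str] = []
--     depth = 0
--     for ch in text:
--         if ch == "(":
--             depth += 1
--         elif ch == ")" and depth > 0:
--             depth -= 1
--         if ch == "+" and depth == 0:
--             part = "".join(current).strip(" ,/")
--             if part:
--                 parts.append(part)
--             current = []
--             continue
--         current.append(ch)
--     tail = "".join(current).strip(" ,/")
--     if tail:
--         parts.append(tail)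
--     return parts or [text]
-- ===== SOURCE B (Python) =====
-- def _split_top_level_plus(text: str) -> list[str]:
--     # pass 1: lengths of the raw segments between top-level plus signs
--     lens = []
--     depth = 0
--     n = 0
--     for ch in text:
--         if ch == "(":
--             depth += 1
--         elif ch == ")" and depth > 0:
--             depth -= 1
--         if ch == "+" and depth == 0:
--             lens.append(n)
--             n = 0
--         else:
--             n += 1
--     lens.append(n)
--     # pass 2: carve the text into segments of those lengths, strip, drop empties
--     parts = []
--     pos = 0
--     for ln in lens:
--         seg = text[pos:pos + ln].strip(" ,/")
--         pos += ln + 1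
--         if seg:
--             parts.append(seg)
--     return parts or [text]
-- ===== Notes on version B (the rewrite author's own statement) =====
-- stated objective: alternative
-- what changed: B never builds per-segment character buffers: a first pass records only the lengths of the raw segments between top-level plus signs, and a second pass carves those segments back out of the text by slicing, strips them and drops empties, instead of A's single loop accumulating characters into a current buffer.
import Mathlib
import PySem

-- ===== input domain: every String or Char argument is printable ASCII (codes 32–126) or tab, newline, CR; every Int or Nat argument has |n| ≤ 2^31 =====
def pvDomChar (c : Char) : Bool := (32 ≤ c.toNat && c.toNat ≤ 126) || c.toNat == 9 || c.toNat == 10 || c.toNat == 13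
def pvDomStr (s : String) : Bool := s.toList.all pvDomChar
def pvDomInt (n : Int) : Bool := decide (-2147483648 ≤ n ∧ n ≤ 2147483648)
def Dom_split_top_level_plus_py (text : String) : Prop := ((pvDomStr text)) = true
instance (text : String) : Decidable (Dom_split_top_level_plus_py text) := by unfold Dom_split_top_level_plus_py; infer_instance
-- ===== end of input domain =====

-- B is a two-pass alternative of the same cost: pass 1 records only the LENGTHS of the raw
-- segments between top-level '+' signs, pass 2 carves the segments back out of the text by
-- slicing, strips them and drops empties — no character buffer is ever built.

-- ===== PORT A =====
def pvStripSet : List Char := [' ', ',', '/']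

-- one iteration of A's character loop: state = (parts, current, depth)
def pvStepA (s : List String × List Char × Int) (ch : Char) : List String × List Char × Int :=
  let parts := s.1
  let current := s.2.1
  let depth := if ch = '(' then s.2.2 + 1 else if ch = ')' ∧ 0 < s.2.2 then s.2.2 - 1 else s.2.2
  if ch = '+' ∧ depth = 0 then
    let part := PySem.Chars.stripChars current pvStripSet
    (if part ≠ [] then parts ++ [String.mk part] else parts, [], depth)
  else
    (parts, current ++ [ch], depth)

def split_top_level_plus_py (text : String) : List String :=
  let st := text.toList.foldl pvStepA ([], [], 0)
  let tail := PySem.Chars.stripChars st.2.1 pvStripSet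
  let parts := if tail ≠ [] then st.1 ++ [String.mk tail] else st.1
  if parts = [] then [text] else parts

-- ===== PORT B =====
-- pass-1 iteration: state = (lens, depth, n) — n counts the chars of the raw segment in progress
def pvLenStep (s : List Nat × Int × Nat) (ch : Char) : List Nat × Int × Nat :=
  let d := if ch = '(' then s.2.1 + 1 else if ch = ')' ∧ 0 < s.2.1 then s.2.1 - 1 else s.2.1
  if ch = '+' ∧ d = 0 then (s.1 ++ [s.2.2], d, 0) else (s.1, d, s.2.2 + 1)

-- pass-2 iteration: state = (parts, pos); text[pos:pos+ln] with pos, ln ≥ 0 is exactly take/drop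
def pvCarveStep (cs : List Char) (s : List String × Nat) (ln : Nat) : List String × Nat :=
  let seg := PySem.Chars.stripChars ((cs.drop s.2).take ln) pvStripSet
  (if seg ≠ [] then s.1 ++ [String.mk seg] else s.1, s.2 + ln + 1)

def split_top_level_plus_py_alt (text : String) : List String :=
  let cs := text.toList
  let st := cs.foldl pvLenStep ([], 0, 0)
  let lens := st.1 ++ [st.2.2]
  let parts := (lens.foldl (pvCarveStep cs) ([], 0)).1
  if parts = [] then [text] else parts

-- ===== PRECONDITION & SPEC =====
def Spec_split_top_level_plus_py (text : String) (out : List String) : Prop := out = split_top_level_plus_py_alt text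
instance (text : String) (out : List String) : Decidable (Spec_split_top_level_plus_py text out) := by unfold Spec_split_top_level_plus_py; infer_instance

-- ===== CLAIM (what is proved, stated in full; the proofs are below) =====
def Claim_equal_split_top_level_plus_py : Prop := ∀ (text : String), Dom_split_top_level_plus_py text → Spec_split_top_level_plus_py text (split_top_level_plus_py text)

-- ===== LEMMAS AND PROOFS =====

-- the depth update both loops perform (same expression as in the ports)
def pvUpd (c : Char) (d : Int) : Int :=
  if c = '(' then d + 1 else if c = ')' ∧ 0 < d then d - 1 else d

-- the raw segments of cs between top-level '+' signs, starting at depth d (reference spec)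
def pvSegs : List Char → Int → List (List Char)
  | [], _ => [[]]
  | c :: cs, d =>
    if c = '+' ∧ pvUpd c d = 0 then [] :: pvSegs cs (pvUpd c d)
    else (c :: (pvSegs cs (pvUpd c d)).headI) :: (pvSegs cs (pvUpd c d)).tail

-- the part (possibly none) a raw segment contributes
def pvEmit (l : List Char) : List String :=
  let p := PySem.Chars.stripChars l pvStripSet
  if p ≠ [] then [String.mk p] else []

def pvLastD : List (List Char) → List Char
  | [] => []
  | [a] => a
  | _ :: b :: l => pvLastD (b :: l)

def pvDepthF (cs : List Char) (d : Int) : Int := cs.foldl (fun d c => pvUpd c d) d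

lemma pvSegs_ne_nil (cs : List Char) (d : Int) : pvSegs cs d ≠ [] := by
  cases cs with
  | nil => simp [pvSegs]
  | cons c cs => simp only [pvSegs]; split <;> simp

lemma pvSegs_cons (cs : List Char) (d : Int) :
    pvSegs cs d = (pvSegs cs d).headI :: (pvSegs cs d).tail := by
  cases h : pvSegs cs d with
  | nil => exact absurd h (pvSegs_ne_nil cs d)
  | cons a t => simp

lemma pvLastD_cons (a : List Char) (L : List (List Char)) (h : L ≠ []) :
    pvLastD (a :: L) = pvLastD L := by
  cases L with
  | nil => exact absurd rfl h
  | cons b l => rfl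

lemma pvDropLast_cons (a : List Char) (L : List (List Char)) (h : L ≠ []) :
    (a :: L).dropLast = a :: L.dropLast := by
  cases L with
  | nil => exact absurd rfl h
  | cons b l => rfl

lemma pvJoin_segs (cs : List Char) (d : Int) :
    PySem.Chars.join ['+'] (pvSegs cs d) = cs := by
  induction cs generalizing d with
  | nil => simp [pvSegs, PySem.Chars.join_singleton]
  | cons c rest ih =>
    simp only [pvSegs]
    split
    · rename_i hc
      rw [pvSegs_cons rest (pvUpd c d), PySem.Chars.join_cons_cons,
        ← pvSegs_cons rest (pvUpd c d), ih]
      simp [hc.1]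
    · have ih' := ih (pvUpd c d)
      rw [pvSegs_cons rest (pvUpd c d)] at ih'
      cases h : (pvSegs rest (pvUpd c d)).tail with
      | nil =>
        rw [h] at ih'
        rw [PySem.Chars.join_singleton] at ih'
        simp [PySem.Chars.join_singleton, ih']
      | cons b bs =>
        rw [h] at ih'
        rw [PySem.Chars.join_cons_cons] at ih'
        rw [PySem.Chars.join_cons_cons,
          show (c :: (pvSegs rest (pvUpd c d)).headI) ++ ['+'] ++ PySem.Chars.join ['+'] (b :: bs)
            = c :: ((pvSegs rest (pvUpd c d)).headI ++ ['+'] ++ PySem.Chars.join ['+'] (b :: bs)) by simp,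
          ih']

-- A's loop, characterised by the reference segments
lemma pvFoldA (cs : List Char) : ∀ (d : Int) (parts : List String) (cur : List Char),
    List.foldl pvStepA (parts, cur, d) cs =
      (parts ++ (((cur ++ (pvSegs cs d).headI) :: (pvSegs cs d).tail).dropLast.flatMap pvEmit),
       pvLastD ((cur ++ (pvSegs cs d).headI) :: (pvSegs cs d).tail),
       pvDepthF cs d) := by
  induction cs with
  | nil =>
    intro d parts cur
    simp [pvSegs, pvLastD, pvDepthF]
  | cons c rest ih =>
    intro d parts cur
    simp only [List.foldl_cons]
    have hdepth : pvDepthF (c :: rest) d = pvDepthF rest (pvUpd c d) := rfl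
    by_cases hc : c = '+' ∧ pvUpd c d = 0
    · have hstep : pvStepA (parts, cur, d) c = (parts ++ pvEmit cur, [], pvUpd c d) := by
        simp only [pvStepA, pvUpd] at hc ⊢
        rw [if_pos hc]
        unfold pvEmit
        split <;> simp_all
      rw [hstep, ih (pvUpd c d) (parts ++ pvEmit cur) []]
      have hseg : pvSegs (c :: rest) d = [] :: pvSegs rest (pvUpd c d) := by
        simp only [pvSegs]; rw [if_pos hc]
      rw [hseg, hdepth]
      simp only [List.nil_append, List.headI_cons, List.tail_cons]
      rw [← pvSegs_cons rest (pvUpd c d),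
        pvDropLast_cons (cur ++ []) _ (pvSegs_ne_nil _ _),
        pvLastD_cons (cur ++ []) _ (pvSegs_ne_nil _ _)]
      simp [List.flatMap_cons, pvEmit]
    · have hstep : pvStepA (parts, cur, d) c = (parts, cur ++ [c], pvUpd c d) := by
        simp only [pvStepA, pvUpd] at hc ⊢
        rw [if_neg hc]
      rw [hstep, ih (pvUpd c d) parts (cur ++ [c])]
      have hseg : pvSegs (c :: rest) d
          = (c :: (pvSegs rest (pvUpd c d)).headI) :: (pvSegs rest (pvUpd c d)).tail := by
        simp only [pvSegs]; rw [if_neg hc]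
      rw [hseg, hdepth]
      simp

-- B's first pass: the recorded lengths are the lengths of the reference segments
lemma pvFoldLens (cs : List Char) : ∀ (d : Int) (acc : List Nat) (n : Nat),
    (cs.foldl pvLenStep (acc, d, n)).1 ++ [(cs.foldl pvLenStep (acc, d, n)).2.2] =
      acc ++ (n + (pvSegs cs d).headI.length) :: ((pvSegs cs d).tail.map List.length) := by
  induction cs with
  | nil =>
    intro d acc n
    simp [pvSegs]
  | cons c rest ih =>
    intro d acc n
    simp only [List.foldl_cons]
    by_cases hc : c = '+' ∧ pvUpd c d = 0
    · have hstep : pvLenStep (acc, d, n) c = (acc ++ [n], pvUpd c d, 0) := by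
        simp only [pvLenStep, pvUpd] at hc ⊢; rw [if_pos hc]
      have hseg : pvSegs (c :: rest) d = [] :: pvSegs rest (pvUpd c d) := by
        simp only [pvSegs]; rw [if_pos hc]
      rw [hstep, ih (pvUpd c d) (acc ++ [n]) 0, hseg]
      simp only [List.headI_cons, List.tail_cons]
      rw [pvSegs_cons rest (pvUpd c d)]
      simp
    · have hstep : pvLenStep (acc, d, n) c = (acc, pvUpd c d, n + 1) := by
        simp only [pvLenStep, pvUpd] at hc ⊢; rw [if_neg hc]
      have hseg : pvSegs (c :: rest) d
          = (c :: (pvSegs rest (pvUpd c d)).headI) :: (pvSegs rest (pvUpd c d)).tail := by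
        simp only [pvSegs]; rw [if_neg hc]
      rw [hstep, ih (pvUpd c d) acc (n + 1), hseg]
      simp only [List.headI_cons, List.tail_cons, List.length_cons]
      congr 2
      omega

-- B's second pass: carving cs by the segment lengths recovers the segments and emits them
lemma pvFoldCarve (segs : List (List Char)) (hne : segs ≠ []) :
    ∀ (cs : List Char) (parts : List String) (pos : Nat),
    cs.drop pos = PySem.Chars.join ['+'] segs →
    ((segs.map List.length).foldl (pvCarveStep cs) (parts, pos)).1 =
      parts ++ segs.flatMap pvEmit := by
  induction segs with
  | nil => exact absurd rfl hne
  | cons s rest ih =>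
    intro cs parts pos hdrop
    cases rest with
    | nil =>
      rw [PySem.Chars.join_singleton] at hdrop
      simp only [List.map_cons, List.map_nil, List.foldl_cons, List.foldl_nil]
      have htake : (cs.drop pos).take s.length = s := by rw [hdrop]; simp
      simp only [pvCarveStep, htake]
      unfold pvEmit
      split <;> simp_all
    | cons s2 rest2 =>
      rw [PySem.Chars.join_cons_cons] at hdrop
      have htake : (cs.drop pos).take s.length = s := by
        rw [hdrop, show s ++ ['+'] ++ PySem.Chars.join ['+'] (s2 :: rest2)
              = s ++ (['+'] ++ PySem.Chars.join ['+'] (s2 :: rest2)) by simp]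
        simp
      have hdrop' : cs.drop (pos + s.length + 1) = PySem.Chars.join ['+'] (s2 :: rest2) := by
        have h1 : cs.drop (pos + s.length + 1) = (cs.drop pos).drop (s.length + 1) := by
          rw [List.drop_drop]; ring_nf
        rw [h1, hdrop, show s ++ ['+'] ++ PySem.Chars.join ['+'] (s2 :: rest2)
              = (s ++ ['+']) ++ PySem.Chars.join ['+'] (s2 :: rest2) by simp]
        rw [List.drop_left' (by simp)]
      have hstep : pvCarveStep cs (parts, pos) s.length =
          (parts ++ pvEmit s, pos + s.length + 1) := by
        simp only [pvCarveStep, htake]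
        unfold pvEmit
        split <;> simp_all
      rw [show (s :: s2 :: rest2).map List.length
            = s.length :: (s2 :: rest2).map List.length from rfl]
      rw [List.foldl_cons, hstep,
        ih (by simp) cs (parts ++ pvEmit s) (pos + s.length + 1) hdrop']
      simp

-- a nonempty list's flatMap splits into its dropLast part and its last element
lemma pvFlatMap_split (L : List (List Char)) (hne : L ≠ []) :
    L.flatMap pvEmit = L.dropLast.flatMap pvEmit ++ pvEmit (pvLastD L) := by
  induction L with
  | nil => exact absurd rfl hne
  | cons a l ih =>
    cases l with
    | nil => simp [pvLastD]
    | cons b l2 =>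
      rw [show pvLastD (a :: b :: l2) = pvLastD (b :: l2) from rfl,
        pvDropLast_cons a _ (by simp)]
      simp only [List.flatMap_cons, List.append_assoc]
      rw [← List.flatMap_cons, ih (by simp)]

-- ===== VERDICT (by name: the statement is the Claim_ definition above) =====
theorem split_top_level_plus_py_spec : Claim_equal_split_top_level_plus_py := by
  intro text _
  unfold Spec_split_top_level_plus_py split_top_level_plus_py split_top_level_plus_py_alt
  dsimp only
  rw [pvFoldA text.toList 0 [] []]
  have hsegs_lens : (text.toList.foldl pvLenStep ([], 0, 0)).1
        ++ [(text.toList.foldl pvLenStep ([], 0, 0)).2.2]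
      = (pvSegs text.toList 0).map List.length := by
    rw [pvFoldLens text.toList 0 [] 0]
    rw [pvSegs_cons text.toList 0]
    simp
  rw [hsegs_lens]
  rw [pvFoldCarve (pvSegs text.toList 0) (pvSegs_ne_nil _ _) text.toList [] 0
      (by simpa using (pvJoin_segs text.toList 0).symm)]
  rw [pvFlatMap_split (pvSegs text.toList 0) (pvSegs_ne_nil _ _)]
  simp only [List.nil_append]
  rw [← pvSegs_cons text.toList 0]
  have hemit : ∀ (l : List Char) (p : List String),
      (if PySem.Chars.stripChars l pvStripSet ≠ [] then
        p ++ [String.mk (PySem.Chars.stripChars l pvStripSet)] else p) = p ++ pvEmit l := by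
    intro l p
    unfold pvEmit
    split <;> simp_all
  rw [hemit]
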